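-- pv_equiv track=rewrite | github.com/danilo-bangitjr-rlcore/cpp-ci-dev | corerl/utils/sympy.py | _is_balanced_braces
-- ===== SOURCE A (Python) =====
-- def _is_balanced_braces(input_string: str) -> bool:
--     """
--     Check if the braces (that we use for escaping the tags) are balanced.
--     Nested braces are not allowed
--     """
--     count = 0
--     for c in input_string:
--         if c == "{":
--             count += 1
--         elif c == "}":
--             count -= 1
--         if count < 0:
--             return False
--
--     return count == 0
-- ===== SOURCE B (Python) =====
-- def _is_balanced_braces(input_string: str) -> bool:
--     # Cancellation instead of a running counter: keep only braces, then
--     # repeatedly delete the "{}" pair ending at the first "}".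
--     braces = [c for c in input_string if c == "{" or c == "}"]
--     while True:
--         try:
--             i = braces.index("}")
--         except ValueError:
--             return not braces
--         if i == 0:
--             return False
--         del braces[i - 1 : i + 1]
-- ===== Notes on version B (the rewrite author's own statement) =====
-- stated objective: alternative
-- what changed: Replaces the single-pass running counter with a pair-cancellation reduction: B filters the input down to its brace characters and then repeatedly deletes the matched open-close pair ending at the first closing brace until none remains.
import Mathlib
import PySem

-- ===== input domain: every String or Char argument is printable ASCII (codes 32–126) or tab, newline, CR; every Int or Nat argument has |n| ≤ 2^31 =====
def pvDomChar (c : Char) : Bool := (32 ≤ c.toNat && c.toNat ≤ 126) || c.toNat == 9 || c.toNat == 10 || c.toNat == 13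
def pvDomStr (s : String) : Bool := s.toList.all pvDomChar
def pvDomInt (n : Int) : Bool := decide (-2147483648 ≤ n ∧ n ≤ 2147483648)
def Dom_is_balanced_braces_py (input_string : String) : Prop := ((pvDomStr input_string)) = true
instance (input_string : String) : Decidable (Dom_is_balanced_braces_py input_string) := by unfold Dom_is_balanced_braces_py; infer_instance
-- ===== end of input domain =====

-- B replaces A's running counter with a pair-cancellation reduction over the brace characters
-- (alternative decomposition, not faster); proved to return the same Bool on every input.


-- ===== PORT A =====
-- the for-loop of A: state is `count`; early `return False` when count < 0
def pvGoA : List Char → Int → Bool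
  | [], count => count == 0
  | c :: rest, count =>
    let count' := if c = '{' then count + 1 else if c = '}' then count - 1 else count
    if count' < 0 then false else pvGoA rest count'

def is_balanced_braces_py (input_string : String) : Bool :=
  pvGoA input_string.toList 0

-- ===== PORT B =====
-- the while-loop of B: `braces.index("}")`; delete braces[i-1:i+1]; `not braces`
def pvAltLoop (l : List Char) : Bool :=
  match h : PySem.List.index? l '}' with
  | none => l.isEmpty
  | some i =>
    if i = 0 then false
    else pvAltLoop (l.take (i - 1) ++ l.drop (i + 1))
termination_by l.length
decreasing_by
  obtain ⟨hk, -, -⟩ := PySem.List.getElem_of_index?_eq_some h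
  simp only [List.length_append, List.length_take, List.length_drop]
  omega

def is_balanced_braces_py_alt (input_string : String) : Bool :=
  pvAltLoop (input_string.toList.filter (fun c => c == '{' || c == '}'))

-- ===== PRECONDITION & SPEC =====
def Spec_is_balanced_braces_py (input_string : String) (out : Bool) : Prop := out = is_balanced_braces_py_alt input_string
instance (input_string : String) (out : Bool) : Decidable (Spec_is_balanced_braces_py input_string out) := by unfold Spec_is_balanced_braces_py; infer_instance

-- ===== CLAIM (what is proved, stated in full; the proofs are below) =====
def Claim_equal_is_balanced_braces_py : Prop := ∀ (input_string : String), Dom_is_balanced_braces_py input_string → Spec_is_balanced_braces_py input_string (is_balanced_braces_py input_string)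

-- ===== LEMMAS AND PROOFS =====

-- A's loop as a state transformer: `none` is the early `return False`
def pvRunA : List Char → Int → Option Int
  | [], c => some c
  | x :: xs, c =>
    let c' := if x = '{' then c + 1 else if x = '}' then c - 1 else c
    if c' < 0 then none else pvRunA xs c'

theorem pvGoA_eq_runA (l : List Char) (c : Int) :
    pvGoA l c = match pvRunA l c with | none => false | some k => k == 0 := by
  induction l generalizing c with
  | nil => rfl
  | cons x xs ih =>
    simp only [pvGoA, pvRunA]
    split_ifs with h <;> simp [ih]

theorem pvRunA_append (u v : List Char) (c : Int) :
    pvRunA (u ++ v) c = (pvRunA u c).bind (pvRunA v) := by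
  induction u generalizing c with
  | nil => rfl
  | cons x xs ih =>
    simp only [List.cons_append, pvRunA]
    split_ifs with h <;> simp [ih]

theorem pvRunA_filter (l : List Char) (c : Int) (hc : 0 ≤ c) :
    pvRunA l c = pvRunA (l.filter (fun c => c == '{' || c == '}')) c := by
  induction l generalizing c with
  | nil => rfl
  | cons x xs ih =>
    rw [List.filter_cons]
    split_ifs with hb
    · simp only [pvRunA]
      split_ifs <;> first | rfl | exact ih _ (by omega)
    · simp only [Bool.or_eq_true, beq_iff_eq, not_or] at hb
      simp only [pvRunA, if_neg hb.1, if_neg hb.2, if_neg (by omega : ¬ c < 0)]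
      exact ih c hc

theorem pvRunA_all_open (p : List Char) (hp : ∀ x ∈ p, x = '{') (c : Int) (hc : 0 ≤ c) :
    pvRunA p c = some (c + p.length) := by
  induction p generalizing c with
  | nil => simp [pvRunA]
  | cons x xs ih =>
    have hx : x = '{' := hp x (by simp)
    subst hx
    rw [show pvRunA ('{' :: xs) c = if c + 1 < 0 then none else pvRunA xs (c + 1) from rfl]
    rw [if_neg (by omega : ¬ c + 1 < 0)]
    rw [ih (fun y hy => hp y (by simp [hy])) (c + 1) (by omega)]
    simp only [List.length_cons]
    congr 1
    push_cast
    ring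

-- the heart: on a braces-only list the cancellation loop computes A's counter verdict
theorem pvAlt_eq_goA (n : Nat) :
    ∀ l : List Char, l.length ≤ n → (∀ x ∈ l, x = '{' ∨ x = '}') →
      pvAltLoop l = pvGoA l 0 := by
  induction n with
  | zero =>
    intro l hl _
    have : l = [] := List.eq_nil_of_length_eq_zero (by omega)
    subst this
    rw [pvAltLoop]
    simp [pvGoA, PySem.List.index?_eq_idxOf?]
  | succ n ih =>
    intro l hl hbr
    rw [pvAltLoop]
    cases hidx : PySem.List.index? l '}' with
    | none =>
      have hno : '}' ∉ l := (PySem.List.index?_eq_none_iff l '}').1 hidx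
      have hop : ∀ x ∈ l, x = '{' := by
        intro x hx
        rcases hbr x hx with h | h
        · exact h
        · exact absurd (h ▸ hx) hno
      rw [pvGoA_eq_runA, pvRunA_all_open l hop 0 le_rfl]
      cases l with
      | nil => simp
      | cons a t =>
        simp only [List.isEmpty_cons, List.length_cons]
        symm
        simp only [beq_eq_false_iff_ne, ne_eq]
        omega
    | some i =>
      obtain ⟨pre, suf, hl', hlen, hnotin⟩ := (PySem.List.index?_eq_some_iff l '}' i).1 hidx
      by_cases hi : i = 0
      · subst hi
        have hpre : pre = [] := List.eq_nil_of_length_eq_zero hlen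
        subst hpre
        simp only [List.nil_append] at hl'
        subst hl'
        simp [pvGoA]
      · simp only [if_neg hi]
        -- pre is nonempty and all '{'
        have hpreop : ∀ x ∈ pre, x = '{' := by
          intro x hx
          rcases hbr x (by rw [hl']; exact List.mem_append_left _ hx) with h | h
          · exact h
          · exact absurd (h ▸ hx) hnotin
        have hpne : pre ≠ [] := by
          intro h; subst h; simp at hlen; omega
        rcases List.eq_nil_or_concat pre with hcon | ⟨p, a, hpa0⟩
        · exact absurd hcon hpne
        have hpa : pre = p ++ [a] := by simpa [List.concat_eq_append] using hpa0
        have ha : a = '{' := hpreop a (by rw [hpa]; simp)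
        subst ha
        have hplen : p.length = i - 1 := by
          rw [hpa] at hlen; simp at hlen; omega
        have hldec : l = p ++ '{' :: '}' :: suf := by
          rw [hl', hpa]; simp
        have htake : l.take (i - 1) = p := by
          rw [hldec, ← hplen, List.take_left]
        have hdrop : l.drop (i + 1) = suf := by
          rw [hldec]
          have : i + 1 = p.length + 2 := by omega
          rw [this]
          rw [show p.length + 2 = (p ++ ['{', '}']).length by simp]
          rw [show p ++ '{' :: '}' :: suf = (p ++ ['{', '}']) ++ suf by simp]
          rw [List.drop_left]
        rw [htake, hdrop]
        have hsub : ∀ x ∈ p ++ suf, x = '{' ∨ x = '}' := by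
          intro x hx
          apply hbr
          rw [hldec]
          rcases List.mem_append.1 hx with h | h
          · exact List.mem_append_left _ h
          · exact List.mem_append_right _ (by simp [h])
        have hlen' : (p ++ suf).length ≤ n := by
          have : l.length = p.length + 2 + suf.length := by rw [hldec]; simp; omega
          simp only [List.length_append]
          omega
        rw [ih (p ++ suf) hlen' hsub]
        -- goA (p ++ suf) 0 = goA l 0
        have hp0 : pvRunA p 0 = some (p.length : Int) := by
          rw [pvRunA_all_open p (fun y hy => hpreop y (by rw [hpa]; exact List.mem_append_left _ hy)) 0 le_rfl]
          simp
        have hmid : pvRunA ('{' :: '}' :: suf) (p.length : Int) = pvRunA suf (p.length : Int) := by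
          have h1 : ¬ ((p.length : Int) + 1 < 0) := by omega
          simp [pvRunA, h1]
        rw [pvGoA_eq_runA, pvGoA_eq_runA, hldec, pvRunA_append, pvRunA_append]
        rw [hp0, Option.bind_some, Option.bind_some, hmid]

-- ===== VERDICT (by name: the statement is the Claim_ definition above) =====
theorem is_balanced_braces_py_spec : Claim_equal_is_balanced_braces_py := by
  intro s _
  unfold Spec_is_balanced_braces_py is_balanced_braces_py is_balanced_braces_py_alt
  rw [pvAlt_eq_goA (s.toList.filter (fun c => c == '{' || c == '}')).length _ le_rfl
      (by intro x hx; have := List.of_mem_filter hx; simpa using this)]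
  rw [pvGoA_eq_runA, pvGoA_eq_runA, pvRunA_filter s.toList 0 le_rfl]
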